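-- pv_equiv track=rewrite | github.com/vishalvirat/practice-code | Magic string.py | min_steps_to_magic_string
-- ===== SOURCE A (Python) =====
-- def min_steps_to_magic_string(s):
--     freq={}
--     for char in s:
--         if char in freq:
--             freq[char]+=1
--         else:
--             freq[char]=1
--     max_freq=max(freq.values())
--     min_steps=len(s)-max_freq
--     return min_steps
-- ===== SOURCE B (Python) =====
-- def min_steps_to_magic_string(s):
--     # Recursive remove-and-conquer: take the first remaining character, drop all
--     # its occurrences (their number is a candidate max), recurse on what is left.
--     def max_count(chars):
--         if not chars:
--             return 0
--         c = chars[0]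
--         rest = [x for x in chars if x != c]
--         return max(len(chars) - len(rest), max_count(rest))
--     return len(s) - max_count(list(s))
-- ===== Notes on version B (the rewrite author's own statement) =====
-- stated objective: alternative
-- what changed: Replaces the frequency-dictionary build plus max-over-values with a recursive remove-and-conquer: repeatedly take the first remaining character, drop all its occurrences (their number is its frequency), and recurse on the remainder, maxing the counts; no table is maintained.
import Mathlib
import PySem

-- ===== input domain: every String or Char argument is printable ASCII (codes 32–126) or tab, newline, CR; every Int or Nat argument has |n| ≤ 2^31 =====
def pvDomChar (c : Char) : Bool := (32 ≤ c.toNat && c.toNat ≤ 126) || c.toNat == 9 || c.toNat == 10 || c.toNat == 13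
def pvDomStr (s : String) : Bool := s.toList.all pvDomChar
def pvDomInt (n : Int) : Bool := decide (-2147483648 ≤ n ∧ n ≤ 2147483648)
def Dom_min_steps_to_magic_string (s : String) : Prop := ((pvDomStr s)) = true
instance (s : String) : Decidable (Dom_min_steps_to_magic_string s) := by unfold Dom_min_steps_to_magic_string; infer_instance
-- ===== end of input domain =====

-- B replaces A's frequency-dictionary build + max-over-values with a recursive
-- remove-and-conquer on the character list (no table): same cost class, different algorithm.

-- ===== PORT A =====
def min_steps_to_magic_string (s : String) : Int :=
  let freq := s.toList.foldl
    (fun d c => if d.contains c then d.insert c (d.getD c 0 + 1) else d.insert c 1)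
    (PySem.Dict.empty : PySem.Dict Char Int)
  match PySem.List.max? freq.values (fun v => v) with
  | some m => PySem.Str.len s - m
  | none => 0   -- unreachable under Pre_: Python's max() raises ValueError on empty s

-- ===== PORT B =====
-- helper max_count: drop all occurrences of the first char (their number is
-- len(chars) - len(rest)), recurse on rest. The fuel argument (list length at the
-- top call) only makes the shrinking recursion structural; it is never exhausted.
def pvMaxCountFuel : Nat → List Char → Int
  | _, [] => 0
  | 0, _ :: _ => 0   -- unreachable: fuel ≥ length
  | n + 1, c :: t =>
      let rest := (c :: t).filter (fun x => x != c)
      max (((c :: t).length : Int) - rest.length) (pvMaxCountFuel n rest)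

def min_steps_to_magic_string_alt (s : String) : Int :=
  PySem.Str.len s - pvMaxCountFuel s.toList.length s.toList

-- ===== PRECONDITION & SPEC =====
-- Pre_ excludes only the empty string, on which Python A raises ValueError (max of an empty sequence).
def Pre_min_steps_to_magic_string (s : String) : Prop := s ≠ ""
instance (s : String) : Decidable (Pre_min_steps_to_magic_string s) := by
  unfold Pre_min_steps_to_magic_string; infer_instance
def pvWitness_min_steps_to_magic_string : String := "abca"

def Spec_min_steps_to_magic_string (s : String) (out : Int) : Prop := out = min_steps_to_magic_string_alt s
instance (s : String) (out : Int) : Decidable (Spec_min_steps_to_magic_string s out) := by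
  unfold Spec_min_steps_to_magic_string; infer_instance

-- ===== CLAIM (what is proved, stated in full; the proofs are below) =====
def Claim_equal_min_steps_to_magic_string : Prop := ∀ (s : String), Dom_min_steps_to_magic_string s → Pre_min_steps_to_magic_string s → Spec_min_steps_to_magic_string s (min_steps_to_magic_string s)

-- ===== LEMMAS AND PROOFS =====

-- A's conditional-update loop is the standard counter loop
theorem loop_eq_counter (xs : List Char) :
    xs.foldl (fun d c => if d.contains c then d.insert c (d.getD c 0 + 1) else d.insert c 1)
      (PySem.Dict.empty : PySem.Dict Char Int)
    = PySem.Dict.counter xs := by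
  rw [← PySem.Dict.foldl_insert_getD_add_one_eq_counter]
  congr 1
  funext d c
  by_cases h : d.contains c
  · simp [h]
  · simp only [Bool.not_eq_true] at h
    rw [if_neg (by simp [h]), PySem.Dict.getD_of_not_contains _ _ h]
    norm_num

theorem set_add_cons_ne (s : List Char) (c y : Char) (h : y ≠ c) :
    PySem.Set.add (c :: s) y = c :: PySem.Set.add s y := by
  simp only [PySem.Set.add, PySem.Set.contains, List.contains_cons,
    beq_eq_false_iff_ne.mpr h, Bool.false_or]
  split_ifs <;> rfl

-- first occurrences of c::t = c followed by first occurrences of t with all c's removed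
theorem foldl_add_cons (c : Char) :
    ∀ (t s : List Char), t.foldl PySem.Set.add (c :: s)
      = c :: (t.filter (fun x => x != c)).foldl PySem.Set.add s := by
  intro t
  induction t with
  | nil => intro s; rfl
  | cons y ys ih =>
      intro s
      by_cases hy : y = c
      · subst hy
        have hskip : PySem.Set.add (y :: s) y = y :: s := by
          simp [PySem.Set.add, PySem.Set.contains]
        rw [List.foldl_cons, hskip, ih, List.filter_cons]
        simp
      · have hb : (y != c) = true := bne_iff_ne.mpr hy
        rw [List.foldl_cons, set_add_cons_ne s c y hy, ih, List.filter_cons, hb]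
        simp
  
theorem ofList_cons_filter (c : Char) (t : List Char) :
    PySem.Set.ofList (c :: t) = c :: PySem.Set.ofList (t.filter (fun x => x != c)) := by
  show (c :: t).foldl PySem.Set.add [] = _
  rw [List.foldl_cons]
  have h1 : PySem.Set.add ([] : List Char) c = [c] := rfl
  rw [h1]
  exact foldl_add_cons c t []

-- removing all c's keeps every other count
theorem count_filter_ne (l : List Char) (d c : Char) (h : d ≠ c) :
    (l.filter (fun x => x != c)).count d = l.count d := by
  rw [List.count_filter]
  simp [bne_iff_ne, h]

-- the first char's count is what the two lengths' difference computes
theorem count_head_eq (l : List Char) (c : Char) :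
    l.count c + (l.filter (fun x => x != c)).length = l.length := by
  rw [← List.countP_eq_length_filter]
  simp only [List.count]
  rw [List.length_eq_countP_add_countP (p := fun x => x == c)]
  congr 1
  apply List.countP_congr
  intro a _
  simp [bne]

theorem foldl_max_shift (xs : List Int) (a x : Int) :
    List.foldl max (max a x) xs = max a (List.foldl max x xs) := by
  induction xs generalizing x with
  | nil => rfl
  | cons y ys ih => simp only [List.foldl_cons, max_assoc, ih]

theorem pvMaxCountFuel_nil (n : Nat) : pvMaxCountFuel n [] = 0 := by
  cases n <;> rfl

-- max over Counter(l)'s values = B's recursive maximum count, for nonempty l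
theorem max_counts_eq_pvMaxCount :
    ∀ (n : Nat) (l : List Char), l.length ≤ n → l ≠ [] →
      PySem.List.max? ((PySem.Set.ofList l).map (fun k => (l.count k : Int))) (fun v => v)
        = some (pvMaxCountFuel n l) := by
  intro n
  induction n with
  | zero =>
      intro l hn hne
      cases l with
      | nil => exact absurd rfl hne
      | cons c t => simp at hn
  | succ n ih =>
      intro l hn hne
      cases l with
      | nil => exact absurd rfl hne
      | cons c t =>
          have hrest : (c :: t).filter (fun x => x != c) = t.filter (fun x => x != c) := by
            simp
          have hcount : ((c :: t).count c : Int)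
              = ((c :: t).length : Int) - ((c :: t).filter (fun x => x != c)).length := by
            have := count_head_eq (c :: t) c
            omega
          have hfuel : pvMaxCountFuel (n + 1) (c :: t)
              = max (((c :: t).length : Int) - ((c :: t).filter (fun x => x != c)).length)
                  (pvMaxCountFuel n ((c :: t).filter (fun x => x != c))) := rfl
          rw [ofList_cons_filter, List.map_cons, PySem.List.max?_id_cons, hfuel, ← hrest]
          have hmapeq :
              (PySem.Set.ofList ((c :: t).filter (fun x => x != c))).map
                  (fun k => ((c :: t).count k : Int))
              = (PySem.Set.ofList ((c :: t).filter (fun x => x != c))).map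
                  (fun k => (((c :: t).filter (fun x => x != c)).count k : Int)) := by
            apply List.map_congr_left
            intro k hk
            have hkmem : k ∈ (c :: t).filter (fun x => x != c) :=
              (PySem.Set.mem_ofList _ _).mp hk
            have hkne : k ≠ c := bne_iff_ne.mp (List.mem_filter.mp hkmem).2
            rw [count_filter_ne _ _ _ hkne]
          rw [hmapeq]
          have hrlen : ((c :: t).filter (fun x => x != c)).length ≤ n := by
            have h1 : ((c :: t).filter (fun x => x != c)).length ≤ t.length := by
              rw [hrest]; exact List.length_filter_le _ _
            simp only [List.length_cons] at hn
            omega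
          cases hre : PySem.Set.ofList ((c :: t).filter (fun x => x != c)) with
          | nil =>
              -- the rest is empty, so its max-count is 0 and c's count dominates
              have hrnil : (c :: t).filter (fun x => x != c) = [] := by
                cases hcase : (c :: t).filter (fun x => x != c) with
                | nil => rfl
                | cons a b =>
                    exfalso
                    have hmem : a ∈ PySem.Set.ofList (a :: b) :=
                      (PySem.Set.mem_ofList _ _).mpr (by simp)
                    rw [← hcase, hre] at hmem
                    exact List.not_mem_nil hmem
              rw [hrnil] at hcount ⊢
              simp only [List.map_nil, List.foldl_nil, pvMaxCountFuel_nil, List.length_nil,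
                Nat.cast_zero, sub_zero] at hcount ⊢
              rw [hcount]
              congr 1
          | cons m ms =>
              have hrne : (c :: t).filter (fun x => x != c) ≠ [] := by
                intro h0
                rw [h0] at hre
                simp [PySem.Set.ofList] at hre
              have hih := ih ((c :: t).filter (fun x => x != c)) hrlen hrne
              rw [hre, List.map_cons, PySem.List.max?_id_cons] at hih
              have hihv := Option.some.inj hih
              simp only [List.map_cons, List.foldl_cons]
              rw [foldl_max_shift, hihv, hcount]

-- ===== VERDICT (by name: the statement is the Claim_ definition above) =====
theorem min_steps_to_magic_string_spec : Claim_equal_min_steps_to_magic_string := by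
  intro s _ hpre
  unfold Spec_min_steps_to_magic_string min_steps_to_magic_string min_steps_to_magic_string_alt
  have hne : s.toList ≠ [] := by
    intro h
    exact hpre (String.toList_eq_nil_iff.mp h)
  have hvals : (PySem.Dict.counter s.toList).values
      = (PySem.Set.ofList s.toList).map (fun k => (s.toList.count k : Int)) := by
    have h : (PySem.Dict.counter s.toList).values
        = (PySem.Dict.counter s.toList).items.map (·.2) := rfl
    rw [h, PySem.Dict.items_counter, List.map_map]
    rfl
  simp only [loop_eq_counter, hvals,
    max_counts_eq_pvMaxCount s.toList.length s.toList (le_refl _) hne]
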